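-- pv_equiv track=rewrite | github.com/MashallAryan1/Hypernet | utils.py | get_weight_indices
-- ===== SOURCE A (Python) =====
-- def get_weight_indices(units):
--     indices, size_acc  = [], 0
--     for i in range(len(units)-1):
--         input_shape,output_shape =units[i]+1, units[i+1]
--         size = input_shape*output_shape
--         indices.append((size_acc,size_acc+size))
--         size_acc+=size
--     return list(zip(*indices))
-- ===== SOURCE B (Python) =====
-- def get_weight_indices(units):
--     pairs = list(zip(units, units[1:]))
--     bound = sum((a + 1) * b for a, b in pairs)
--     rev_starts, rev_ends = [], []
--     for a, b in reversed(pairs):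
--         rev_ends.append(bound)
--         bound -= (a + 1) * b
--         rev_starts.append(bound)
--     if not pairs:
--         return []
--     return [tuple(reversed(rev_starts)), tuple(reversed(rev_ends))]
-- ===== Notes on version B (the rewrite author's own statement) =====
-- stated objective: alternative
-- what changed: Instead of A's forward loop accumulating (start,end) pairs with a running sum and transposing them, B pairs adjacent units with zip, computes the total size up front, then traverses the pairs in REVERSE building the starts row and the ends row directly back-to-front by subtracting each size from the running upper bound; no pair list is transposed.
import Mathlib
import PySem

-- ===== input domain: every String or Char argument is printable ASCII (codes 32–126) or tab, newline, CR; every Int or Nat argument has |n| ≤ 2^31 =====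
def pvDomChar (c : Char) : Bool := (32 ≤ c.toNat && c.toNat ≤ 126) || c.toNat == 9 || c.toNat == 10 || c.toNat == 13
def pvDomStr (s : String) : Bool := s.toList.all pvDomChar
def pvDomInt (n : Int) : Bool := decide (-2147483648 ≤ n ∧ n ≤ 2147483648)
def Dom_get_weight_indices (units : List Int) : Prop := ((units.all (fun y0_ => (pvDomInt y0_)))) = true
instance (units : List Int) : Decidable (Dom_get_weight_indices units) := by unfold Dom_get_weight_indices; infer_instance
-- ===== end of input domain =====

-- B builds the starts/ends rows directly back-to-front (total size first, reverse traversal subtracting sizes) instead of A's forward running-sum pair list + transpose (alternative, same cost).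


-- ===== PORT A =====
def get_weight_indices (units : List Int) : List (List Int) :=
  let r := (PySem.List.pyRange 0 ((units.length : Int) - 1) 1).foldl
    (fun (st : List (Int × Int) × Int) i =>
      let input_shape := PySem.List.pyGetD units i 0 + 1
      let output_shape := PySem.List.pyGetD units (i + 1) 0
      let size := input_shape * output_shape
      (st.1 ++ [(st.2, st.2 + size)], st.2 + size))
    ([], 0)
  match r.1 with
  | [] => []
  | pairs => [pairs.map Prod.fst, pairs.map Prod.snd]

-- ===== PORT B =====
def get_weight_indices_alt (units : List Int) : List (List Int) :=
  let pairs := units.zip units.tail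
  let r := pairs.reverse.foldl
    (fun (st : Int × List Int × List Int) p =>
      let re := st.2.2 ++ [st.1]
      let bound := st.1 - (p.1 + 1) * p.2
      (bound, st.2.1 ++ [bound], re))
    ((pairs.map (fun p => (p.1 + 1) * p.2)).sum, [], [])
  if pairs.isEmpty then [] else [r.2.1.reverse, r.2.2.reverse]

-- ===== PRECONDITION & SPEC =====
def Spec_get_weight_indices (units : List Int) (out : List (List Int)) : Prop := out = get_weight_indices_alt units
instance (units : List Int) (out : List (List Int)) : Decidable (Spec_get_weight_indices units out) := by unfold Spec_get_weight_indices; infer_instance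

-- ===== CLAIM (what is proved, stated in full; the proofs are below) =====
def Claim_equal_get_weight_indices : Prop := ∀ (units : List Int), Dom_get_weight_indices units → Spec_get_weight_indices units (get_weight_indices units)

-- ===== LEMMAS AND PROOFS =====

-- Common spec: the (start, end) pair of each adjacent-units pair, offsets accumulated left to right.
def pairsAt : List (Int × Int) → Int → List (Int × Int)
  | [], _ => []
  | p :: rest, off => (off, off + (p.1 + 1) * p.2) :: pairsAt rest (off + (p.1 + 1) * p.2)

def szSum (ps : List (Int × Int)) : Int := (ps.map (fun p => (p.1 + 1) * p.2)).sum

-- A's fold (re-indexed over List.range with getD) appends exactly pairsAt of the zipped adjacent pairs.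
lemma A_char : ∀ (us : List Int) (pr : List (Int × Int)) (acc : Int),
    ((List.range (us.length - 1)).foldl
      (fun (st : List (Int × Int) × Int) (k : Nat) =>
        (st.1 ++ [(st.2, st.2 + (us.getD k 0 + 1) * us.getD (k + 1) 0)],
         st.2 + (us.getD k 0 + 1) * us.getD (k + 1) 0)) (pr, acc))
    = (pr ++ pairsAt (us.zip us.tail) acc, acc + szSum (us.zip us.tail)) := by
  intro us
  induction us with
  | nil => intro pr acc; simp [pairsAt, szSum]
  | cons u vs ih =>
    intro pr acc
    cases vs with
    | nil => simp [pairsAt, szSum]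
    | cons v rest =>
      have hlen : (u :: v :: rest : List Int).length - 1 = rest.length + 1 := by simp
      rw [hlen, List.range_succ_eq_map, List.foldl_cons, List.foldl_map]
      have hbody : (fun (st : List (Int × Int) × Int) (k : Nat) =>
          (st.1 ++ [(st.2, st.2 + ((u :: v :: rest).getD (k + 1) 0 + 1) * (u :: v :: rest).getD (k + 1 + 1) 0)],
           st.2 + ((u :: v :: rest).getD (k + 1) 0 + 1) * (u :: v :: rest).getD (k + 1 + 1) 0))
        = (fun (st : List (Int × Int) × Int) (k : Nat) =>
          (st.1 ++ [(st.2, st.2 + ((v :: rest).getD k 0 + 1) * (v :: rest).getD (k + 1) 0)],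
           st.2 + ((v :: rest).getD k 0 + 1) * (v :: rest).getD (k + 1) 0)) := by
        funext st k; simp
      have hl : (v :: rest : List Int).length - 1 = rest.length := by simp
      simp only [Nat.succ_eq_add_one, hbody]
      rw [← hl, ih (pr ++ [(acc, acc + ((u :: v :: rest).getD 0 0 + 1) * (u :: v :: rest).getD 1 0)])]
      simp [pairsAt, szSum]
      ring

-- B's reverse fold, started at off + szSum ps, produces the reversed rows of pairsAt ps off.
lemma B_char : ∀ (ps : List (Int × Int)) (off : Int) (rs re : List Int),
    (ps.reverse.foldl
      (fun (st : Int × List Int × List Int) p =>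
        (st.1 - (p.1 + 1) * p.2, st.2.1 ++ [st.1 - (p.1 + 1) * p.2], st.2.2 ++ [st.1]))
      (off + szSum ps, rs, re))
    = (off, rs ++ ((pairsAt ps off).map Prod.fst).reverse, re ++ ((pairsAt ps off).map Prod.snd).reverse) := by
  intro ps
  induction ps with
  | nil => intro off rs re; simp [pairsAt, szSum]
  | cons p rest ih =>
    intro off rs re
    have hsum : off + szSum (p :: rest) = (off + (p.1 + 1) * p.2) + szSum rest := by
      simp [szSum]; ring
    rw [List.reverse_cons, List.foldl_append, hsum, ih]
    simp [pairsAt]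

theorem get_weight_indices_equal (units : List Int) :
    get_weight_indices units = get_weight_indices_alt units := by
  unfold get_weight_indices get_weight_indices_alt
  have hcast : ∀ k : Nat, ((k : Int) + 1) = ((k + 1 : Nat) : Int) := by intro k; push_cast; ring
  have hrange : PySem.List.pyRange 0 ((units.length : Int) - 1) 1
      = (List.range (units.length - 1)).map (fun (k : Nat) => (Int.ofNat k)) := by
    rw [PySem.List.pyRange_one]
    have ht : ((units.length : Int) - 1 - 0).toNat = units.length - 1 := by omega
    rw [ht]
    simp [Int.ofNat_eq_natCast]
  rw [hrange, List.foldl_map]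
  simp only [Int.ofNat_eq_natCast, hcast, PySem.List.pyGetD_natCast]
  rw [A_char]
  have hB := B_char (units.zip units.tail) 0 [] []
  simp only [zero_add, szSum] at hB
  rw [hB]
  cases h : pairsAt (units.zip units.tail) 0 with
  | nil =>
    cases hz : units.zip units.tail with
    | nil => simp
    | cons q qs => rw [hz] at h; simp [pairsAt] at h
  | cons q qs =>
    cases hz : units.zip units.tail with
    | nil => rw [hz] at h; simp [pairsAt] at h
    | cons w ws => simp

-- ===== VERDICT (by name: the statement is the Claim_ definition above) =====
theorem get_weight_indices_spec : Claim_equal_get_weight_indices := by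
  intro units _
  exact get_weight_indices_equal units
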